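-- pv_equiv track=rewrite | github.com/NCBI-Hackathons/Virulence_AMR_Data_Index | emh_code/tf-idf/lzd_tf-idf.py | lzd
-- ===== SOURCE A (Python) =====
-- alphabet = 'gatc'
--
-- def lzd(s, d_init={k:0 for k in alphabet}):
--     d = dict(d_init.items())
--     i = 0
--     for n in range(1, len(s)):
--         if not s[i:n] in d:
--             d[s[i:n]] = 0
--             d[s[i:n-1]] = d.get(s[i:n-1], -1) + 1
--             i = n
--     return d
-- ===== SOURCE B (Python) =====
-- def lzd(s, d_init={k: 0 for k in 'gatc'}):
--     d = dict(d_init.items())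
--     # trie over the keys of d: per-node child maps + terminal flags; nodes are list indices
--     children = [{}]
--     term = [False]
--
--     def insert_word(word):
--         node = 0
--         for ch in word:
--             nxt = children[node].get(ch)
--             if nxt is None:
--                 nxt = len(children)
--                 children.append({})
--                 term.append(False)
--                 children[node][ch] = nxt
--             node = nxt
--         term[node] = True
--
--     for k in d:
--         insert_word(k)
--
--     node = 0
--     buf = []
--     for ch in s[:-1]:
--         nxt = children[node].get(ch)
--         if nxt is not None and term[nxt]:
--             node = nxt
--             buf.append(ch)
--         else:
--             if nxt is None:
--                 nxt = len(children)
--                 children.append({})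
--                 term.append(False)
--                 children[node][ch] = nxt
--             term[nxt] = True
--             prev = ''.join(buf)
--             phrase = prev + ch
--             d[phrase] = 0
--             d[prev] = d.get(prev, -1) + 1
--             node = 0
--             buf = []
--     return d
-- ===== Notes on version B (the rewrite author's own statement) =====
-- stated objective: alternative
-- what changed: Replaces the dict of growing substrings tested by re-slicing s[i:n] each step with a trie over the phrase dictionary that is advanced one character per input character, so no substring is ever re-sliced or re-hashed (the output dict is still maintained for the result).
import Mathlib
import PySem

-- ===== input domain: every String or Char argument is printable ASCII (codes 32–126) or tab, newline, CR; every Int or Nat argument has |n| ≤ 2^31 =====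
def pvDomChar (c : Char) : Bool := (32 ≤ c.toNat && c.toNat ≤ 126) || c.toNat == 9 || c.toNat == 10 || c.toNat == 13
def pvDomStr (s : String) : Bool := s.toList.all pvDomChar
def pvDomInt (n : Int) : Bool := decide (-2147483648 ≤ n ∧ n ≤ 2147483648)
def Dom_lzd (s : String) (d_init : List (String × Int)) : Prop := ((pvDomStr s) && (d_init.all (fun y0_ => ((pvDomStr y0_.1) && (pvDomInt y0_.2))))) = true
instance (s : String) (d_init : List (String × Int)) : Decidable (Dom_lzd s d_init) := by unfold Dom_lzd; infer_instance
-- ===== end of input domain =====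

-- B replaces the re-sliced-substring dict membership test with a trie advanced one character at a time; return values proved equal.

-- ===== PORT A =====
-- d = dict(d_init.items()); i = 0; for n in range(1, len(s)): if not s[i:n] in d: …
def lzd (s : String) (d_init : List (String × Int)) : List (String × Int) :=
  let d0 : PySem.Dict String Int := PySem.Dict.ofList d_init
  let fin :=
    (PySem.List.pyRange 1 (PySem.Str.len s) 1).foldl
      (fun (st : PySem.Dict String Int × Int) n =>
        let d := st.1
        let i := st.2
        if ¬ d.contains (PySem.Str.slice s (some i) (some n)) then
          let d := d.insert (PySem.Str.slice s (some i) (some n)) 0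
          let prev := PySem.Str.slice s (some i) (some (n - 1))
          let d := d.insert prev (d.getD prev (-1) + 1)
          (d, n)
        else st)
      (d0, 0)
  fin.1.items

-- ===== PORT B =====
-- trie state of Source B: per-node child maps (children) and terminal flags (term); nodes are list indices
structure LzdSt where
  d : PySem.Dict String Int
  children : List (PySem.Dict Char Nat)
  term : List Bool
  node : Nat
  buf : List Char
  deriving Repr, DecidableEq

-- the inner 'for ch in word' loop of insert_word (carries node)
def lzdTrieIns (children : List (PySem.Dict Char Nat)) (term : List Bool) (node : Nat) :
    List Char → List (PySem.Dict Char Nat) × List Bool × Nat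
  | [] => (children, term, node)
  | ch :: rest =>
    match (children.getD node PySem.Dict.empty).get? ch with
    | some nxt => lzdTrieIns children term nxt rest
    | none =>
        let nxt := children.length
        lzdTrieIns
          ((children ++ [PySem.Dict.empty]).set node
            ((children.getD node PySem.Dict.empty).insert ch nxt))
          (term ++ [false]) nxt rest

-- insert_word(word): walk/extend the trie along word, then mark the final node terminal
def lzdInsertWord (children : List (PySem.Dict Char Nat)) (term : List Bool) (word : List Char) :
    List (PySem.Dict Char Nat) × List Bool :=
  let r := lzdTrieIns children term 0 word
  (r.1, r.2.1.set r.2.2 true)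

-- body of 'for ch in s[:-1]'
def lzdStep (st : LzdSt) (ch : Char) : LzdSt :=
  match (st.children.getD st.node PySem.Dict.empty).get? ch with
  | some nxt =>
    if st.term.getD nxt false then
      { st with node := nxt, buf := st.buf ++ [ch] }
    else
      let term := st.term.set nxt true
      let prev := String.ofList st.buf
      let phrase := prev.push ch
      let d := st.d.insert phrase 0
      let d := d.insert prev (d.getD prev (-1) + 1)
      { d := d, children := st.children, term := term, node := 0, buf := [] }
  | none =>
      let nxt := st.children.length
      let children := (st.children ++ [PySem.Dict.empty]).set st.node
        ((st.children.getD st.node PySem.Dict.empty).insert ch nxt)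
      let term := (st.term ++ [false]).set nxt true
      let prev := String.ofList st.buf
      let phrase := prev.push ch
      let d := st.d.insert phrase 0
      let d := d.insert prev (d.getD prev (-1) + 1)
      { d := d, children := children, term := term, node := 0, buf := [] }

def lzd_alt (s : String) (d_init : List (String × Int)) : List (String × Int) :=
  let d0 : PySem.Dict String Int := PySem.Dict.ofList d_init
  -- for k in d: insert_word(k)
  let ct := d0.keys.foldl (fun (ct : List (PySem.Dict Char Nat) × List Bool) k =>
    lzdInsertWord ct.1 ct.2 k.toList) ([PySem.Dict.empty], [false])
  -- for ch in s[:-1]: …   (s[:-1] is PySem.Str.slice s none (some (-1)))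
  let fin := (PySem.Str.slice s none (some (-1))).toList.foldl lzdStep
    { d := d0, children := ct.1, term := ct.2, node := 0, buf := [] }
  fin.d.items

-- ===== PRECONDITION & SPEC =====
def Spec_lzd (s : String) (d_init : List (String × Int)) (out : List (String × Int)) : Prop := out = lzd_alt s d_init
instance (s : String) (d_init : List (String × Int)) (out : List (String × Int)) : Decidable (Spec_lzd s d_init out) := by unfold Spec_lzd; infer_instance

-- ===== CLAIM (what is proved, stated in full; the proofs are below) =====
def Claim_equal_lzd : Prop := ∀ (s : String) (d_init : List (String × Int)), Dom_lzd s d_init → Spec_lzd s d_init (lzd s d_init)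


-- ===== LEMMAS AND PROOFS =====

-- proof-side view of the trie: walking a word from a node, membership of a word
def pvWalk (c : List (PySem.Dict Char Nat)) : Nat → List Char → Option Nat
  | node, [] => some node
  | node, ch :: rest =>
    match (c.getD node PySem.Dict.empty).get? ch with
    | some nxt => pvWalk c nxt rest
    | none => none

def pvCont (c : List (PySem.Dict Char Nat)) (t : List Bool) (w : List Char) : Bool :=
  match pvWalk c 0 w with
  | some k => t.getD k false
  | none => false

-- well-formedness: matching lengths, nonempty, edge targets in range, walks reach each node by at most one word
def pvWF (c : List (PySem.Dict Char Nat)) (t : List Bool) : Prop :=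
  c.length = t.length ∧ 0 < c.length ∧
  (∀ node ch nxt, ((c.getD node PySem.Dict.empty).get? ch = some nxt) → nxt < c.length) ∧
  (∀ w1 w2 k, pvWalk c 0 w1 = some k → pvWalk c 0 w2 = some k → w1 = w2)

-- the one-edge extension both lzdTrieIns and lzdStep perform
def pvAdd (c : List (PySem.Dict Char Nat)) (node : Nat) (ch : Char) : List (PySem.Dict Char Nat) :=
  (c ++ [PySem.Dict.empty]).set node ((c.getD node PySem.Dict.empty).insert ch c.length)

theorem pvWalk_append (c : List (PySem.Dict Char Nat)) (u v : List Char) :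
    ∀ node, pvWalk c node (u ++ v) = (pvWalk c node u).bind (fun m => pvWalk c m v) := by
  induction u with
  | nil => intro node; simp [pvWalk]
  | cons x rest ih =>
    intro node
    simp only [List.cons_append, pvWalk]
    cases (c.getD node PySem.Dict.empty).get? x with
    | some nxt => simpa using ih nxt
    | none => simp

theorem pvWalk_lt (c : List (PySem.Dict Char Nat))
    (hE : ∀ node ch nxt, ((c.getD node PySem.Dict.empty).get? ch = some nxt) → nxt < c.length) :
    ∀ (w : List Char) (node k : Nat), node < c.length → pvWalk c node w = some k → k < c.length := by
  intro w
  induction w with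
  | nil => intro node k h hw; cases hw; exact h
  | cons x rest ih =>
    intro node k h hw
    unfold pvWalk at hw
    cases hstep : (c.getD node PySem.Dict.empty).get? x with
    | some nxt => rw [hstep] at hw; exact ih nxt k (hE node x nxt hstep) hw
    | none => rw [hstep] at hw; cases hw

theorem pvCont_eq_some (c : List (PySem.Dict Char Nat)) (t : List Bool) (w : List Char) (k : Nat)
    (h : pvWalk c 0 w = some k) : pvCont c t w = t.getD k false := by
  unfold pvCont
  rw [h]

theorem pvCont_eq_none (c : List (PySem.Dict Char Nat)) (t : List Bool) (w : List Char)
    (h : pvWalk c 0 w = none) : pvCont c t w = false := by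
  unfold pvCont
  rw [h]

theorem pvAdd_length (c : List (PySem.Dict Char Nat)) (node : Nat) (ch : Char) :
    (pvAdd c node ch).length = c.length + 1 := by
  simp [pvAdd]

theorem pvAdd_getD_node (c : List (PySem.Dict Char Nat)) (node : Nat) (ch : Char)
    (h : node < c.length) :
    (pvAdd c node ch).getD node PySem.Dict.empty
      = (c.getD node PySem.Dict.empty).insert ch c.length := by
  unfold pvAdd
  rw [List.getD_eq_getElem?_getD, List.getElem?_set_self (by simp; omega)]
  rfl

theorem pvAdd_getD_ne (c : List (PySem.Dict Char Nat)) (node : Nat) (ch : Char)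
    (m : Nat) (hm : m ≠ node) (hmL : m ≠ c.length) :
    (pvAdd c node ch).getD m PySem.Dict.empty = c.getD m PySem.Dict.empty := by
  unfold pvAdd
  rw [List.getD_eq_getElem?_getD, List.getElem?_set_ne (by omega)]
  rcases Nat.lt_trichotomy m c.length with h | h | h
  · rw [List.getElem?_append_left h, ← List.getD_eq_getElem?_getD]
  · omega
  · rw [List.getElem?_eq_none (by simp; omega), List.getD_eq_getElem?_getD,
      List.getElem?_eq_none (by omega)]

theorem pvAdd_getD_L (c : List (PySem.Dict Char Nat)) (node : Nat) (ch : Char)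
    (h : node < c.length) :
    (pvAdd c node ch).getD c.length PySem.Dict.empty = PySem.Dict.empty := by
  unfold pvAdd
  rw [List.getD_eq_getElem?_getD, List.getElem?_set_ne (by omega)]
  rw [List.getElem?_append_right (by omega)]
  simp

-- step characterisation in pvAdd
theorem pvAdd_step (c : List (PySem.Dict Char Nat)) (node : Nat) (ch : Char)
    (hnode : node < c.length)
    (m : Nat) (hm : m < c.length) (x : Char) :
    ((pvAdd c node ch).getD m PySem.Dict.empty).get? x
      = if m = node ∧ x = ch then some c.length else (c.getD m PySem.Dict.empty).get? x := by
  by_cases hmn : m = node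
  · subst hmn
    rw [pvAdd_getD_node c m ch hm, PySem.Dict.get?_insert]
    by_cases hx : x = ch
    · simp [hx]
    · simp [hx]
  · rw [pvAdd_getD_ne c node ch m hmn (by omega)]
    simp [hmn]

theorem pvAdd_walk_old (c : List (PySem.Dict Char Nat)) (node : Nat) (ch : Char)
    (hE : ∀ node' ch' nxt, ((c.getD node' PySem.Dict.empty).get? ch' = some nxt) → nxt < c.length)
    (hnode : node < c.length)
    (hnone : (c.getD node PySem.Dict.empty).get? ch = none) :
    ∀ (w : List Char) (m k : Nat), m < c.length → k ≠ c.length →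
      (pvWalk (pvAdd c node ch) m w = some k ↔ pvWalk c m w = some k) := by
  intro w
  induction w with
  | nil => intro m k hm hk; simp [pvWalk]
  | cons x rest ih =>
    intro m k hm hk
    unfold pvWalk
    rw [pvAdd_step c node ch hnode m hm x]
    by_cases hcase : m = node ∧ x = ch
    · rw [if_pos hcase, hcase.2, hcase.1, hnone]
      show pvWalk (pvAdd c node ch) c.length rest = some k ↔ (none : Option Nat) = some k
      constructor
      · intro hw
        exfalso
        cases rest with
        | nil =>
          unfold pvWalk at hw
          exact hk (by cases hw; rfl)
        | cons y t =>
          unfold pvWalk at hw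
          rw [pvAdd_getD_L c node ch hnode] at hw
          simp [PySem.Dict.get?_empty] at hw
      · intro hw; cases hw
    · rw [if_neg hcase]
      cases hstep : (c.getD m PySem.Dict.empty).get? x with
      | some nxt => exact ih nxt k (hE m x nxt hstep) hk
      | none => simp

theorem pvAdd_walk_new (c : List (PySem.Dict Char Nat)) (node : Nat) (ch : Char)
    (hE : ∀ node' ch' nxt, ((c.getD node' PySem.Dict.empty).get? ch' = some nxt) → nxt < c.length)
    (hnode : node < c.length)
    (hnone : (c.getD node PySem.Dict.empty).get? ch = none) :
    ∀ (w : List Char) (m : Nat), m < c.length →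
      pvWalk (pvAdd c node ch) m w = some c.length →
      ∃ u, w = u ++ [ch] ∧ pvWalk c m u = some node := by
  intro w
  induction w with
  | nil => intro m hm hw; cases hw; omega
  | cons x rest ih =>
    intro m hm hw
    unfold pvWalk at hw
    rw [pvAdd_step c node ch hnode m hm x] at hw
    by_cases hcase : m = node ∧ x = ch
    · rw [if_pos hcase] at hw
      have hw2 : pvWalk (pvAdd c node ch) c.length rest = some c.length := hw
      cases rest with
      | nil => exact ⟨[], by simp [hcase.2], by simp [pvWalk, hcase.1]⟩
      | cons y t =>
        exfalso
        unfold pvWalk at hw2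
        rw [pvAdd_getD_L c node ch hnode] at hw2
        simp [PySem.Dict.get?_empty] at hw2
    · rw [if_neg hcase] at hw
      cases hstep : (c.getD m PySem.Dict.empty).get? x with
      | some nxt =>
        rw [hstep] at hw
        obtain ⟨u, hu, hwalk⟩ := ih nxt (hE m x nxt hstep) hw
        exact ⟨x :: u, by simp [hu], by unfold pvWalk; rw [hstep]; exact hwalk⟩
      | none => rw [hstep] at hw; cases hw

theorem pvAdd_walk_buf (c : List (PySem.Dict Char Nat)) (node : Nat) (ch : Char) (buf : List Char)
    (hE : ∀ node' ch' nxt, ((c.getD node' PySem.Dict.empty).get? ch' = some nxt) → nxt < c.length)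
    (hroot : 0 < c.length)
    (hnode : node < c.length)
    (hnone : (c.getD node PySem.Dict.empty).get? ch = none)
    (hbuf : pvWalk c 0 buf = some node) :
    pvWalk (pvAdd c node ch) 0 (buf ++ [ch]) = some c.length := by
  rw [pvWalk_append]
  have h1 : pvWalk (pvAdd c node ch) 0 buf = some node :=
    (pvAdd_walk_old c node ch hE hnode hnone buf 0 node hroot (by omega)).2 hbuf
  rw [h1]
  have h2 : pvWalk (pvAdd c node ch) node [ch] = some c.length := by
    unfold pvWalk
    rw [pvAdd_step c node ch hnode node hnode ch, if_pos ⟨rfl, rfl⟩]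
    rfl
  exact h2

theorem pvAdd_WF (c : List (PySem.Dict Char Nat)) (t : List Bool) (node : Nat) (ch : Char)
    (hWF : pvWF c t) (hnode : node < c.length)
    (hnone : (c.getD node PySem.Dict.empty).get? ch = none) :
    pvWF (pvAdd c node ch) (t ++ [false]) := by
  obtain ⟨hlen, hroot, hE, hU⟩ := hWF
  refine ⟨by simp [pvAdd_length, hlen], by rw [pvAdd_length]; omega, ?_, ?_⟩
  · intro m x nxt h
    rw [pvAdd_length]
    by_cases hm : m < c.length
    · rw [pvAdd_step c node ch hnode m hm x] at h
      by_cases hcase : m = node ∧ x = ch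
      · rw [if_pos hcase] at h; cases h; omega
      · rw [if_neg hcase] at h; have := hE m x nxt h; omega
    · by_cases hmL : m = c.length
      · subst hmL; rw [pvAdd_getD_L c node ch hnode] at h; simp [PySem.Dict.get?_empty] at h
      · rw [pvAdd_getD_ne c node ch m (by omega) hmL] at h
        have hnone' : c.getD m PySem.Dict.empty = PySem.Dict.empty := by
          rw [List.getD_eq_getElem?_getD, List.getElem?_eq_none (by omega)]
          rfl
        rw [hnone'] at h; simp [PySem.Dict.get?_empty] at h
  · intro w1 w2 k h1 h2
    by_cases hk : k = c.length
    · subst hk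
      obtain ⟨u1, hu1, hwalk1⟩ := pvAdd_walk_new c node ch hE hnode hnone w1 0 hroot h1
      obtain ⟨u2, hu2, hwalk2⟩ := pvAdd_walk_new c node ch hE hnode hnone w2 0 hroot h2
      rw [hu1, hu2, hU u1 u2 node hwalk1 hwalk2]
    · exact hU w1 w2 k
        ((pvAdd_walk_old c node ch hE hnode hnone w1 0 k hroot hk).1 h1)
        ((pvAdd_walk_old c node ch hE hnode hnone w2 0 k hroot hk).1 h2)

theorem pvAdd_cont (c : List (PySem.Dict Char Nat)) (t : List Bool) (node : Nat) (ch : Char)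
    (hWF : pvWF c t) (hnode : node < c.length)
    (hnone : (c.getD node PySem.Dict.empty).get? ch = none)
    (w : List Char) :
    pvCont (pvAdd c node ch) (t ++ [false]) w = pvCont c t w := by
  obtain ⟨hlen, hroot, hE, hU⟩ := hWF
  cases hw : pvWalk (pvAdd c node ch) 0 w with
  | some k =>
    rw [pvCont_eq_some _ _ _ _ hw]
    by_cases hk : k = c.length
    · subst hk
      have hwnone : pvWalk c 0 w = none := by
        cases hw' : pvWalk c 0 w with
        | some k' =>
          exfalso
          have hk' := pvWalk_lt c hE w 0 k' hroot hw'
          have h2 := (pvAdd_walk_old c node ch hE hnode hnone w 0 k' hroot (by omega)).2 hw'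
          rw [hw] at h2; cases h2; omega
        | none => rfl
      rw [pvCont_eq_none _ _ _ hwnone]
      rw [List.getD_eq_getElem?_getD, List.getElem?_append_right (by omega)]
      simp [hlen]
    · have hw2 := (pvAdd_walk_old c node ch hE hnode hnone w 0 k hroot hk).1 hw
      rw [pvCont_eq_some _ _ _ _ hw2]
      have hkc : k < c.length := pvWalk_lt c hE w 0 k hroot hw2
      rw [List.getD_eq_getElem?_getD, List.getElem?_append_left (by omega),
        ← List.getD_eq_getElem?_getD]
  | none =>
    rw [pvCont_eq_none _ _ _ hw]
    cases hw2 : pvWalk c 0 w with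
    | some k2 =>
      exfalso
      have hk2 := pvWalk_lt c hE w 0 k2 hroot hw2
      have h2 := (pvAdd_walk_old c node ch hE hnode hnone w 0 k2 hroot (by omega)).2 hw2
      rw [hw] at h2; cases h2
    | none => rw [pvCont_eq_none _ _ _ hw2]

theorem pvSetTerm_cont (c : List (PySem.Dict Char Nat)) (t : List Bool) (u : List Char) (k : Nat)
    (hWF : pvWF c t) (hu : pvWalk c 0 u = some k) (w : List Char) :
    pvCont c (t.set k true) w = (pvCont c t w || decide (w = u)) := by
  obtain ⟨hlen, hroot, hE, hU⟩ := hWF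
  have hk : k < t.length := by have := pvWalk_lt c hE u 0 k hroot hu; omega
  by_cases hwu : w = u
  · subst hwu
    rw [pvCont_eq_some _ _ _ _ hu, pvCont_eq_some _ _ _ _ hu]
    simp [List.getD_eq_getElem?_getD, List.getElem?_set_self hk]
  · cases hw : pvWalk c 0 w with
    | some m =>
      rw [pvCont_eq_some _ _ _ _ hw, pvCont_eq_some _ _ _ _ hw]
      have hmk : m ≠ k := fun h => hwu (hU w u k (h ▸ hw) hu)
      rw [List.getD_eq_getElem?_getD, List.getElem?_set_ne (fun h => hmk h.symm),
        ← List.getD_eq_getElem?_getD]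
      simp [hwu]
    | none =>
      rw [pvCont_eq_none _ _ _ hw, pvCont_eq_none _ _ _ hw]
      simp [hwu]

theorem pvWF_set (c : List (PySem.Dict Char Nat)) (t : List Bool) (k : Nat) (v : Bool)
    (hWF : pvWF c t) : pvWF c (t.set k v) := by
  obtain ⟨hlen, hroot, hE, hU⟩ := hWF
  exact ⟨by simp [hlen], hroot, hE, hU⟩

-- correctness of the inner insert_word walk
theorem pvTrieIns_spec (rest : List Char) :
    ∀ (c : List (PySem.Dict Char Nat)) (t : List Bool) (node : Nat) (pref : List Char),
      pvWF c t → pvWalk c 0 pref = some node →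
      pvWF (lzdTrieIns c t node rest).1 (lzdTrieIns c t node rest).2.1 ∧
      pvWalk (lzdTrieIns c t node rest).1 0 (pref ++ rest) = some (lzdTrieIns c t node rest).2.2 ∧
      (∀ w, pvCont (lzdTrieIns c t node rest).1 (lzdTrieIns c t node rest).2.1 w = pvCont c t w) := by
  induction rest with
  | nil =>
    intro c t node pref hWF hpref
    simpa [lzdTrieIns] using ⟨hWF, hpref⟩
  | cons ch rest ih =>
    intro c t node pref hWF hpref
    have hnode : node < c.length := pvWalk_lt c hWF.2.2.1 pref 0 node hWF.2.1 hpref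
    cases hstep : (c.getD node PySem.Dict.empty).get? ch with
    | some nxt =>
      have hred : lzdTrieIns c t node (ch :: rest) = lzdTrieIns c t nxt rest := by
        show (match (c.getD node PySem.Dict.empty).get? ch with
          | some nxt => lzdTrieIns c t nxt rest
          | none => lzdTrieIns ((c ++ [PySem.Dict.empty]).set node
              ((c.getD node PySem.Dict.empty).insert ch c.length)) (t ++ [false]) c.length rest)
            = lzdTrieIns c t nxt rest
        rw [hstep]
      have hwalk : pvWalk c 0 (pref ++ [ch]) = some nxt := by
        rw [pvWalk_append, hpref]
        have h2 : pvWalk c node [ch] = some nxt := by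
          unfold pvWalk
          rw [hstep]
          rfl
        exact h2
      have := ih c t nxt (pref ++ [ch]) hWF hwalk
      rw [hred]
      simpa [List.append_assoc] using this
    | none =>
      have hred : lzdTrieIns c t node (ch :: rest)
          = lzdTrieIns (pvAdd c node ch) (t ++ [false]) c.length rest := by
        show (match (c.getD node PySem.Dict.empty).get? ch with
          | some nxt => lzdTrieIns c t nxt rest
          | none => lzdTrieIns ((c ++ [PySem.Dict.empty]).set node
              ((c.getD node PySem.Dict.empty).insert ch c.length)) (t ++ [false]) c.length rest)
            = lzdTrieIns (pvAdd c node ch) (t ++ [false]) c.length rest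
        rw [hstep]
        rfl
      have hWF' := pvAdd_WF c t node ch hWF hnode hstep
      have hwalk' : pvWalk (pvAdd c node ch) 0 (pref ++ [ch]) = some c.length :=
        pvAdd_walk_buf c node ch pref hWF.2.2.1 hWF.2.1 hnode hstep hpref
      have := ih (pvAdd c node ch) (t ++ [false]) c.length (pref ++ [ch]) hWF' hwalk'
      have hcont := fun w => pvAdd_cont c t node ch hWF hnode hstep w
      rw [hred]
      constructor
      · exact this.1
      constructor
      · simpa [List.append_assoc] using this.2.1
      · intro w
        rw [this.2.2 w, hcont w]

theorem pvInsertWord_spec (c : List (PySem.Dict Char Nat)) (t : List Bool) (word : List Char)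
    (hWF : pvWF c t) :
    pvWF (lzdInsertWord c t word).1 (lzdInsertWord c t word).2 ∧
    (∀ w, pvCont (lzdInsertWord c t word).1 (lzdInsertWord c t word).2 w
        = (pvCont c t w || decide (w = word))) := by
  have h0 : pvWalk c 0 ([] : List Char) = some 0 := rfl
  have h := pvTrieIns_spec word c t 0 [] hWF h0
  rw [List.nil_append] at h
  unfold lzdInsertWord
  constructor
  · exact pvWF_set _ _ _ _ h.1
  · intro w
    rw [pvSetTerm_cont _ _ word _ h.1 h.2.1 w, h.2.2 w]

theorem pvKeysFold_spec (ks : List String) :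
    ∀ (c : List (PySem.Dict Char Nat)) (t : List Bool), pvWF c t →
      pvWF (ks.foldl (fun ct k => lzdInsertWord ct.1 ct.2 k.toList) (c, t)).1
           (ks.foldl (fun ct k => lzdInsertWord ct.1 ct.2 k.toList) (c, t)).2 ∧
      (∀ w, pvCont (ks.foldl (fun ct k => lzdInsertWord ct.1 ct.2 k.toList) (c, t)).1
                   (ks.foldl (fun ct k => lzdInsertWord ct.1 ct.2 k.toList) (c, t)).2 w
          = (pvCont c t w || ks.any (fun k => decide (w = k.toList)))) := by
  induction ks with
  | nil => intro c t hWF; simpa using hWF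
  | cons k ks ih =>
    intro c t hWF
    have h1 := pvInsertWord_spec c t k.toList hWF
    have h2 := ih (lzdInsertWord c t k.toList).1 (lzdInsertWord c t k.toList).2 h1.1
    constructor
    · simpa using h2.1
    · intro w
      have := h2.2 w
      simp only [List.foldl_cons] at *
      rw [this, h1.2 w]
      simp [Bool.or_assoc]

theorem pvGetD_singleton (m : Nat) :
    ([PySem.Dict.empty] : List (PySem.Dict Char Nat)).getD m PySem.Dict.empty
      = PySem.Dict.empty := by
  cases m with
  | zero => rfl
  | succ n =>
    rw [List.getD_eq_getElem?_getD, List.getElem?_eq_none (by simp)]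
    rfl

theorem pvWF_init : pvWF [PySem.Dict.empty] [false] := by
  refine ⟨rfl, by simp, ?_, ?_⟩
  · intro node ch nxt h
    rw [pvGetD_singleton] at h
    simp [PySem.Dict.get?_empty] at h
  · intro w1 w2 k h1 h2
    have hnil : ∀ w : List Char, ∀ m, pvWalk [PySem.Dict.empty] m w = some k → w = [] := by
      intro w
      cases w with
      | nil => intro m _; rfl
      | cons x rest =>
        intro m h
        unfold pvWalk at h
        rw [pvGetD_singleton] at h
        simp [PySem.Dict.get?_empty] at h
    rw [hnil w1 0 h1, hnil w2 0 h2]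

theorem pvCont_init (w : List Char) : pvCont [PySem.Dict.empty] [false] w = false := by
  unfold pvCont
  cases hw : pvWalk [PySem.Dict.empty] 0 w with
  | some k =>
    cases w with
    | nil => cases hw; rfl
    | cons x rest =>
      unfold pvWalk at hw
      rw [pvGetD_singleton] at hw
      simp [PySem.Dict.get?_empty] at hw
  | none => rfl


-- ===== bridges and A-side step =====

def lzdStepA (s : String) (st : PySem.Dict String Int × Int) (n : Int) :
    PySem.Dict String Int × Int :=
  let d := st.1
  let i := st.2
  if ¬ d.contains (PySem.Str.slice s (some i) (some n)) then
    let d := d.insert (PySem.Str.slice s (some i) (some n)) 0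
    let prev := PySem.Str.slice s (some i) (some (n - 1))
    let d := d.insert prev (d.getD prev (-1) + 1)
    (d, n)
  else st

theorem lzd_eq (s : String) (d_init : List (String × Int)) :
    lzd s d_init
      = ((PySem.List.pyRange 1 (PySem.Str.len s) 1).foldl (lzdStepA s)
          (PySem.Dict.ofList d_init, 0)).1.items := rfl

theorem pvOfList_inj (l l' : List Char) (h : String.ofList l = String.ofList l') : l = l' := by
  have := congrArg String.toList h
  simpa using this

theorem pvBeq_ofList (l l' : List Char) :
    (String.ofList l == String.ofList l') = decide (l = l') := by
  by_cases h : l = l'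
  · simp [h]
  · simp only [h, decide_false]
    exact beq_eq_false_iff_ne.2 (fun hc => h (pvOfList_inj l l' hc))

theorem pvPush (l : List Char) (c : Char) :
    (String.ofList l).push c = String.ofList (l ++ [c]) := by
  apply String.toList_injective
  simp

theorem pvSliceNat (s : String) (a b : Nat) :
    PySem.Str.slice s (some (a:Int)) (some (b:Int))
      = String.ofList ((s.toList.drop a).take (b - a)) := by
  simp [PySem.Str.slice, PySem.List.slice_natCast]

theorem pvTakeSucc (cs : List Char) (j k : Nat) (x : Char) (hx : cs[j+k]? = some x) :
    (cs.drop j).take (k+1) = (cs.drop j).take k ++ [x] := by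
  rw [List.take_succ]
  congr 1
  rw [List.getElem?_drop, hx]
  rfl

-- reductions of lzdStep by branch
theorem pvStep_some_term (st : LzdSt) (ch : Char) (nxt : Nat)
    (h : (st.children.getD st.node PySem.Dict.empty).get? ch = some nxt)
    (ht : st.term.getD nxt false = true) :
    lzdStep st ch = { st with node := nxt, buf := st.buf ++ [ch] } := by
  have h' : (st.children[st.node]?.getD PySem.Dict.empty).get? ch = some nxt := by
    rw [← List.getD_eq_getElem?_getD]; exact h
  have ht' : st.term[nxt]?.getD false = true := by
    rw [← List.getD_eq_getElem?_getD]; exact ht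
  simp [lzdStep, h', ht']

theorem pvStep_some_new (st : LzdSt) (ch : Char) (nxt : Nat)
    (h : (st.children.getD st.node PySem.Dict.empty).get? ch = some nxt)
    (ht : st.term.getD nxt false = false) :
    lzdStep st ch =
      { d := (st.d.insert ((String.ofList st.buf).push ch) 0).insert (String.ofList st.buf)
              ((st.d.insert ((String.ofList st.buf).push ch) 0).getD (String.ofList st.buf) (-1) + 1),
        children := st.children, term := st.term.set nxt true, node := 0, buf := [] } := by
  have h' : (st.children[st.node]?.getD PySem.Dict.empty).get? ch = some nxt := by
    rw [← List.getD_eq_getElem?_getD]; exact h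
  have ht' : st.term[nxt]?.getD false = false := by
    rw [← List.getD_eq_getElem?_getD]; exact ht
  simp [lzdStep, h', ht']

theorem pvStep_none (st : LzdSt) (ch : Char)
    (h : (st.children.getD st.node PySem.Dict.empty).get? ch = none) :
    lzdStep st ch =
      { d := (st.d.insert ((String.ofList st.buf).push ch) 0).insert (String.ofList st.buf)
              ((st.d.insert ((String.ofList st.buf).push ch) 0).getD (String.ofList st.buf) (-1) + 1),
        children := pvAdd st.children st.node ch,
        term := (st.term ++ [false]).set st.children.length true, node := 0, buf := [] } := by
  have h' : (st.children[st.node]?.getD PySem.Dict.empty).get? ch = none := by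
    rw [← List.getD_eq_getElem?_getD]; exact h
  simp [lzdStep, h', pvAdd]

-- ===== the main simulation =====

theorem pvLoop (s : String) (r : List Char) :
    ∀ (m j : Nat) (dA : PySem.Dict String Int) (st : LzdSt),
      r = s.toList.dropLast.drop m →
      st.d = dA →
      pvWF st.children st.term →
      pvWalk st.children 0 st.buf = some st.node →
      j ≤ m →
      st.buf = (s.toList.drop j).take (m - j) →
      (∀ w : List Char, w ≠ [] → dA.contains (String.ofList w) = pvCont st.children st.term w) →
      (st.buf ≠ [] → dA.contains (String.ofList st.buf) = true) →
      ((PySem.List.pyRange ((m:Int)+1) ((s.toList.length : Nat) : Int) 1).foldl (lzdStepA s)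
          (dA, (j:Int))).1
        = (r.foldl lzdStep st).d := by
  induction r with
  | nil =>
    intro m j dA st hr hd hWF hwalk hjm hbuf hinv hbufmem
    have hlen : s.toList.dropLast.length ≤ m := List.drop_eq_nil_iff.1 hr.symm
    have hm : s.toList.length ≤ m + 1 := by
      rw [List.length_dropLast] at hlen
      omega
    rw [PySem.List.pyRange_one_eq_nil (by push_cast; omega)]
    simpa using hd.symm
  | cons ch r' ih =>
    intro m j dA st hr hd hWF hwalk hjm hbuf hinv hbufmem
    set cs := s.toList with hcs
    have hmlt : m < cs.dropLast.length := by
      by_contra hcon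
      push_neg at hcon
      rw [List.drop_eq_nil_of_le hcon] at hr
      cases hr
    have hmlen : m < cs.length - 1 := by
      simpa [List.length_dropLast] using hmlt
    have hdropeq : cs.dropLast.drop m = cs.dropLast[m] :: cs.dropLast.drop (m+1) :=
      List.drop_eq_getElem_cons hmlt
    rw [hdropeq] at hr
    have hpair := List.cons.inj hr
    have hch : ch = cs[m] := by
      rw [hpair.1, List.getElem_dropLast]
    have hr' : r' = cs.dropLast.drop (m+1) := hpair.2
    -- unfold one step of A's range
    have hrange : PySem.List.pyRange ((m:Int)+1) ((cs.length : Nat) : Int) 1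
        = ((m:Int)+1) :: PySem.List.pyRange ((m:Int)+1+1) ((cs.length : Nat) : Int) 1 :=
      PySem.List.pyRange_one_cons (by push_cast; omega)
    rw [hrange, List.foldl_cons, List.foldl_cons]
    -- A's slices at this step
    have hslice1 : PySem.Str.slice s (some (j:Int)) (some ((m:Int)+1))
        = String.ofList ((cs.drop j).take (m+1-j)) := by
      have : ((m:Int)+1) = ((m+1 : Nat) : Int) := by push_cast; ring
      rw [this, pvSliceNat]
    have hslice2 : PySem.Str.slice s (some (j:Int)) (some ((m:Int)+1-1))
        = String.ofList ((cs.drop j).take (m-j)) := by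
      have : ((m:Int)+1-1) = ((m : Nat) : Int) := by push_cast; ring
      rw [this, pvSliceNat]
    have hphrase : (cs.drop j).take (m+1-j) = st.buf ++ [ch] := by
      have h1 : m + 1 - j = (m - j) + 1 := by omega
      have h2 : j + (m - j) = m := by omega
      have hmlt2 : m < cs.length := by omega
      have hq : cs[j+(m-j)]? = some ch := by
        rw [h2, hch]
        exact List.getElem?_eq_getElem hmlt2
      rw [h1, pvTakeSucc cs j (m-j) ch hq, ← hbuf]
    obtain ⟨hlen2, hroot, hE, hU⟩ := hWF
    cases hstep : (st.children.getD st.node PySem.Dict.empty).get? ch with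
    | some nxt =>
      have hwalkphrase : pvWalk st.children 0 (st.buf ++ [ch]) = some nxt := by
        rw [pvWalk_append, hwalk]
        have h2 : pvWalk st.children st.node [ch] = some nxt := by
          unfold pvWalk
          rw [hstep]
          rfl
        exact h2
      by_cases hterm : st.term.getD nxt false = true
      · -- phrase already in dict: A does nothing, B advances in the trie
        have hcont : dA.contains (String.ofList (st.buf ++ [ch])) = true := by
          rw [hinv (st.buf ++ [ch]) (by simp), pvCont_eq_some _ _ _ _ hwalkphrase, hterm]
        have hA : lzdStepA s (dA, (j:Int)) ((m:Int)+1) = (dA, (j:Int)) := by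
          simp only [lzdStepA, hslice1, hphrase]
          rw [if_neg (by rw [hcont]; simp)]
        rw [hA, pvStep_some_term st ch nxt hstep hterm]
        exact ih (m+1) j dA _ (by simpa using hr') (by simpa using hd)
          ⟨by simpa using hlen2, hroot, hE, hU⟩
          (by simpa using hwalkphrase) (by omega)
          (by simpa using hphrase.symm)
          (by intro w hw; simpa using hinv w hw)
          (by intro _; simpa using hcont)
      · -- new phrase, trie node exists but was not terminal: mark it
        have hterm' : st.term.getD nxt false = false := by
          cases h : st.term.getD nxt false
          · rfl
          · exact absurd h hterm
        have hcont : dA.contains (String.ofList (st.buf ++ [ch])) = false := by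
          rw [hinv (st.buf ++ [ch]) (by simp), pvCont_eq_some _ _ _ _ hwalkphrase, hterm']
        have hA : lzdStepA s (dA, (j:Int)) ((m:Int)+1)
            = ((dA.insert (String.ofList (st.buf ++ [ch])) 0).insert (String.ofList st.buf)
                ((dA.insert (String.ofList (st.buf ++ [ch])) 0).getD (String.ofList st.buf) (-1) + 1),
               (m:Int)+1) := by
          simp only [lzdStepA, hslice1, hslice2, hphrase, ← hbuf]
          rw [if_pos (by rw [hcont]; simp)]
        rw [hA, pvStep_some_new st ch nxt hstep hterm']
        have hcontnew : ∀ w : List Char, w ≠ [] →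
            ((dA.insert (String.ofList (st.buf ++ [ch])) 0).insert (String.ofList st.buf)
              ((dA.insert (String.ofList (st.buf ++ [ch])) 0).getD (String.ofList st.buf) (-1) + 1)).contains
                (String.ofList w)
              = pvCont st.children (st.term.set nxt true) w := by
          intro w hw
          rw [PySem.Dict.contains_insert, PySem.Dict.contains_insert, pvBeq_ofList, pvBeq_ofList]
          rw [pvSetTerm_cont st.children st.term (st.buf ++ [ch]) nxt
            ⟨hlen2, hroot, hE, hU⟩ hwalkphrase w]
          by_cases hwp : w = st.buf ++ [ch]
          · simp [hwp, hcont]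
          · by_cases hwb : w = st.buf
            · have hbufne : st.buf ≠ [] := by rw [← hwb]; exact hw
              have h1 : dA.contains (String.ofList st.buf) = true := hbufmem hbufne
              have h2 : pvCont st.children st.term st.buf = true := by
                rw [← hinv st.buf hbufne]; exact h1
              simp [hwb, hwp, h2]
            · rw [hinv w hw]
              simp [hwb, hwp]
        have hcast : ((m:Int)+1) = (((m+1 : Nat)) : Int) := by push_cast; ring
        rw [hcast]
        exact ih (m+1) (m+1) _ _ (by simpa using hr') (by rw [pvPush, hd])
            ⟨by simpa using hlen2, hroot, hE, hU⟩ rfl (by omega)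
            (by simp) (fun w hw => by simpa using hcontnew w hw)
            (by intro h; exact absurd rfl h)
    | none =>
      -- new phrase, new trie node
      have hwalknone : pvWalk st.children 0 (st.buf ++ [ch]) = none := by
        rw [pvWalk_append, hwalk]
        have h2 : pvWalk st.children st.node [ch] = none := by
          unfold pvWalk
          rw [hstep]
        exact h2
      have hcont : dA.contains (String.ofList (st.buf ++ [ch])) = false := by
        rw [hinv (st.buf ++ [ch]) (by simp), pvCont_eq_none _ _ _ hwalknone]
      have hnode : st.node < st.children.length :=
        pvWalk_lt st.children hE st.buf 0 st.node hroot hwalk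
      have hA : lzdStepA s (dA, (j:Int)) ((m:Int)+1)
          = ((dA.insert (String.ofList (st.buf ++ [ch])) 0).insert (String.ofList st.buf)
              ((dA.insert (String.ofList (st.buf ++ [ch])) 0).getD (String.ofList st.buf) (-1) + 1),
             (m:Int)+1) := by
        simp only [lzdStepA, hslice1, hslice2, hphrase, ← hbuf]
        rw [if_pos (by rw [hcont]; simp)]
      rw [hA, pvStep_none st ch hstep]
      have hWF' : pvWF (pvAdd st.children st.node ch) ((st.term ++ [false]).set st.children.length true) :=
        pvWF_set _ _ _ _ (pvAdd_WF st.children st.term st.node ch ⟨hlen2, hroot, hE, hU⟩ hnode hstep)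
      have hwalkL : pvWalk (pvAdd st.children st.node ch) 0 (st.buf ++ [ch]) = some st.children.length :=
        pvAdd_walk_buf st.children st.node ch st.buf hE hroot hnode hstep hwalk
      have hcontnew : ∀ w : List Char, w ≠ [] →
          ((dA.insert (String.ofList (st.buf ++ [ch])) 0).insert (String.ofList st.buf)
            ((dA.insert (String.ofList (st.buf ++ [ch])) 0).getD (String.ofList st.buf) (-1) + 1)).contains
              (String.ofList w)
            = pvCont (pvAdd st.children st.node ch) ((st.term ++ [false]).set st.children.length true) w := by
        intro w hw
        rw [PySem.Dict.contains_insert, PySem.Dict.contains_insert, pvBeq_ofList, pvBeq_ofList]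
        rw [pvSetTerm_cont (pvAdd st.children st.node ch) (st.term ++ [false]) (st.buf ++ [ch])
          st.children.length
          (pvAdd_WF st.children st.term st.node ch ⟨hlen2, hroot, hE, hU⟩ hnode hstep) hwalkL w]
        rw [pvAdd_cont st.children st.term st.node ch ⟨hlen2, hroot, hE, hU⟩ hnode hstep w]
        by_cases hwp : w = st.buf ++ [ch]
        · simp [hwp, hcont]
        · by_cases hwb : w = st.buf
          · have hbufne : st.buf ≠ [] := by rw [← hwb]; exact hw
            have h1 : dA.contains (String.ofList st.buf) = true := hbufmem hbufne
            have h2 : pvCont st.children st.term st.buf = true := by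
              rw [← hinv st.buf hbufne]; exact h1
            simp [hwb, hwp, h2]
          · rw [hinv w hw]
            simp [hwb, hwp]
      have hcast : ((m:Int)+1) = (((m+1 : Nat)) : Int) := by push_cast; ring
      rw [hcast]
      exact ih (m+1) (m+1) _ _ (by simpa using hr') (by rw [pvPush, hd]) hWF'
        rfl
        (by omega) (by simp) (fun w hw => by simpa using hcontnew w hw)
        (by intro h; exact absurd rfl h)

-- ===== VERDICT (by name: the statement is the Claim_ definition above) =====
theorem lzd_spec : Claim_equal_lzd := by
  intro s d_init _
  show lzd s d_init = lzd_alt s d_init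
  have hkf := pvKeysFold_spec (PySem.Dict.ofList d_init).keys [PySem.Dict.empty] [false] pvWF_init
  have hinv0 : ∀ w : List Char, w ≠ [] →
      (PySem.Dict.ofList d_init).contains (String.ofList w)
        = pvCont ((PySem.Dict.ofList d_init).keys.foldl
            (fun ct k => lzdInsertWord ct.1 ct.2 k.toList) ([PySem.Dict.empty], [false])).1
          ((PySem.Dict.ofList d_init).keys.foldl
            (fun ct k => lzdInsertWord ct.1 ct.2 k.toList) ([PySem.Dict.empty], [false])).2 w := by
    intro w hw
    rw [hkf.2 w, pvCont_init]
    simp only [Bool.false_or]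
    have hiff : ((PySem.Dict.ofList d_init).contains (String.ofList w) = true)
        ↔ ((PySem.Dict.ofList d_init).keys.any (fun k => decide (w = k.toList)) = true) := by
      rw [PySem.Dict.contains_iff_mem_keys, List.any_eq_true]
      constructor
      · intro hmem
        exact ⟨String.ofList w, hmem, by simp⟩
      · rintro ⟨k, hk, hdec⟩
        have hwk : w = k.toList := of_decide_eq_true hdec
        have : String.ofList w = k := by rw [hwk]; simp
        rw [this]
        exact hk
    cases h1 : (PySem.Dict.ofList d_init).contains (String.ofList w) <;>
      cases h2 : (PySem.Dict.ofList d_init).keys.any (fun k => decide (w = k.toList)) <;>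
        simp_all
  have hmain := pvLoop s ((PySem.Str.slice s none (some (-1))).toList) 0 0
    (PySem.Dict.ofList d_init)
    ⟨PySem.Dict.ofList d_init,
     ((PySem.Dict.ofList d_init).keys.foldl
        (fun ct k => lzdInsertWord ct.1 ct.2 k.toList) ([PySem.Dict.empty], [false])).1,
     ((PySem.Dict.ofList d_init).keys.foldl
        (fun ct k => lzdInsertWord ct.1 ct.2 k.toList) ([PySem.Dict.empty], [false])).2,
     0, []⟩
    (by rw [PySem.Str.slice_to_neg_one, List.drop_zero])
    rfl hkf.1 rfl (Nat.le_refl 0) (by simp)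
    (fun w hw => hinv0 w hw)
    (by intro h; exact absurd rfl h)
  rw [lzd_eq]
  have hlen : PySem.Str.len s = ((s.toList.length : Nat) : Int) := by
    simp [PySem.Str.len_eq]
  rw [hlen, show (1 : Int) = ((0:Nat):Int)+1 by norm_num,
    show (0 : Int) = ((0:Nat):Int) by norm_num]
  show _ = lzd_alt s d_init
  unfold lzd_alt
  exact congrArg PySem.Dict.items hmain
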